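-- pv_equiv track=rewrite | github.com/ZyMa-1/BeatmapBannerMakerCLI | tests/TestDataGenerator.py | generate_test_data_from_dict
-- ===== SOURCE A (Python) =====
-- from typing import List, Dict
--
-- def generate_test_data_from_dict(data: Dict[str, List[str]]) -> List[Dict[str, str]]:
--     """
--     Generates test data with O(n^2 * m), not O(m^n).
--     Just 1 test case for every parameter with whatever other arguments to check if that one parameter works fine.
--
--     For example input:
--     {
--         'entry_1': [0, 1],
--         'entry_2': [2, 3, 4]
--     }
--
--     Should result in following output:
--     [
--         {'entry_1': 0, 'entry_2' 2},
--         {'entry_1': 1, 'entry_2' 2},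
--         {'entry_1': 0, 'entry_2' 2},
--         {'entry_1': 0, 'entry_2' 3},
--         {'entry_1': 0, 'entry_2' 4}
--     ]
--
--     """
--     res_test_data = []
--     for key, val in data.items():
--         for j in range(len(val)):
--             current_test_data = {}
--             for k2, val2 in data.items():
--                 if k2 != key:
--                     current_test_data[k2] = val2[0]
--
--             current_test_data[key] = val[j]
--
--             res_test_data.append(current_test_data)
--
--     return res_test_data
-- ===== SOURCE B (Python) =====
-- def generate_test_data_from_dict(data):
--     # Recursive "zipper" pass: carry the already-processed keys' (key, first value)
--     # pairs as a growing prefix, build the suffix from the remaining items, and emit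
--     # all cases for the current key as prefix + suffix + varied pair.
--     def first(v):
--         return v[0] if v else None
--
--     def go(prefix, rest):
--         if not rest:
--             return []
--         (key, val), tail = rest[0], rest[1:]
--         suffix = [(k, first(v)) for k, v in tail]
--         cases = [dict(prefix + suffix + [(key, x)]) for x in val]
--         return cases + go(prefix + [(key, first(val))], tail)
--
--     return go([], list(data.items()))
-- ===== Notes on version B (the rewrite author's own statement) =====
-- stated objective: alternative
-- what changed: B is a recursive zipper over the items: it carries the processed keys' (key, first value) pairs as a growing prefix and builds each case as prefix + suffix + varied pair by concatenation, with no per-case rescan of all keys and no key-inequality filtering as in A's inner loop.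
-- outside the precondition, e.g. on generate_test_data_from_dict({'a': ['x'], 'b': []}): A raises IndexError, B returns [{'b': None, 'a': 'x'}]
import Mathlib
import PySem

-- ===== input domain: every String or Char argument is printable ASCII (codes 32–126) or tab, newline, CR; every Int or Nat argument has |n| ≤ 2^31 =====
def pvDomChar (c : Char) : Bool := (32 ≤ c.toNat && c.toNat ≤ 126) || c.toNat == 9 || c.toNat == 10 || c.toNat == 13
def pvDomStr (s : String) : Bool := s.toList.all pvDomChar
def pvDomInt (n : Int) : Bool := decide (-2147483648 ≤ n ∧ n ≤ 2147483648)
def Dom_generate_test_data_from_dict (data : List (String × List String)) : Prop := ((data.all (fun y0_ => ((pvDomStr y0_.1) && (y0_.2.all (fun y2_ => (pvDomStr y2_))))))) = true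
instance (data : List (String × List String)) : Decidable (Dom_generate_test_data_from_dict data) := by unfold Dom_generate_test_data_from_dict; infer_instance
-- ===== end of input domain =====

-- B replaces A's per-case rescan of all keys by a recursive zipper over the items
-- (a growing prefix of (key, first value) pairs; each case = prefix ++ suffix ++ varied pair);
-- objective: alternative decomposition, same cost.

-- ===== PORT A =====
def generate_test_data_from_dict (data : List (String × List String)) : List (List (String × String)) :=
  (data.foldl (fun res kv =>
    (PySem.List.pyRange 0 (PySem.List.len kv.2) 1).foldl (fun res2 j =>
      let cur : PySem.Dict String String :=
        data.foldl (fun d kv2 =>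
          if kv2.1 ≠ kv.1 then d.insert kv2.1 (PySem.List.pyGetD kv2.2 0 "") else d)
          PySem.Dict.empty
      res2 ++ [(cur.insert kv.1 (PySem.List.pyGetD kv.2 j "")).items]) res) [])

-- ===== PORT B =====
-- Python's 'v[0] if v else None': inside Pre_ the None branch is unreachable
-- (all value lists empty means no case is ever emitted), so "" is an exact stand-in.
def pvFirst (v : List String) : String := v.headD ""

def pvGo (pref : List (String × String)) (rest : List (String × List String)) : List (List (String × String)) :=
  match rest with
  | [] => []
  | (key, val) :: tail =>
    let suffix := tail.map (fun kv => (kv.1, pvFirst kv.2))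
    (val.map (fun x => (PySem.Dict.ofList (pref ++ suffix ++ [(key, x)])).items)) ++
      pvGo (pref ++ [(key, pvFirst val)]) tail

def generate_test_data_from_dict_alt (data : List (String × List String)) : List (List (String × String)) :=
  pvGo [] data

-- ===== PRECONDITION & SPEC =====
-- Pre_ excludes (1) association lists with duplicate keys, which no Python dict argument can
-- represent, and (2) inputs mixing an empty with a non-empty value list, on which A raises
-- IndexError (val2[0] on the empty list).
def Pre_generate_test_data_from_dict (data : List (String × List String)) : Prop :=
  (data.map Prod.fst).Nodup ∧
    ((∀ kv ∈ data, kv.2 ≠ []) ∨ (∀ kv ∈ data, kv.2 = []))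
instance (data : List (String × List String)) : Decidable (Pre_generate_test_data_from_dict data) := by unfold Pre_generate_test_data_from_dict; infer_instance

def pvWitness_generate_test_data_from_dict : (List (String × List String)) :=
  [("a", ["x", "y"]), ("b", ["z"])]

def Spec_generate_test_data_from_dict (data : List (String × List String)) (out : List (List (String × String))) : Prop := out = generate_test_data_from_dict_alt data
instance (data : List (String × List String)) (out : List (List (String × String))) : Decidable (Spec_generate_test_data_from_dict data out) := by unfold Spec_generate_test_data_from_dict; infer_instance

-- ===== CLAIM (what is proved, stated in full; the proofs are below) =====
def Claim_equal_generate_test_data_from_dict : Prop := ∀ (data : List (String × List String)), Dom_generate_test_data_from_dict data → Pre_generate_test_data_from_dict data → Spec_generate_test_data_from_dict data (generate_test_data_from_dict data)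

-- ===== LEMMAS AND PROOFS =====

-- Python's v[0] (guarded) is the list's head
theorem pv_getD_zero_eq_first (v : List String) : PySem.List.pyGetD v 0 "" = pvFirst v := by
  cases v <;> simp [pvFirst, pysem]

-- dict(l + [(k, v)]) = dict(l) with (k, v) inserted last
theorem pv_ofList_append_singleton (l : List (String × String)) (k v : String) :
    PySem.Dict.ofList (l ++ [(k, v)]) = (PySem.Dict.ofList l).insert k v := by
  simp [PySem.Dict.ofList, PySem.Dict.update, List.foldl_append]

-- A's inner loop (skip the varied key, insert everyone else's first value) builds dict(filtered pairs)
theorem pv_foldl_if_insert (data : List (String × List String)) (key : String) :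
    (data.foldl (fun d kv2 => if kv2.1 ≠ key then d.insert kv2.1 (PySem.List.pyGetD kv2.2 0 "") else d) PySem.Dict.empty)
    = PySem.Dict.ofList ((data.filter (fun kv2 => kv2.1 ≠ key)).map (fun kv2 => (kv2.1, pvFirst kv2.2))) := by
  rw [PySem.Dict.ofList, PySem.Dict.update, List.foldl_map, List.foldl_filter]
  simp [pv_getD_zero_eq_first]

theorem pv_map_range_get {β : Type} (xs : List String) (g : String → β) :
    (PySem.List.pyRange 0 (PySem.List.len xs) 1).map (fun j => g (PySem.List.pyGetD xs j "")) = xs.map g := by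
  rw [show (fun j => g (PySem.List.pyGetD xs j "")) = g ∘ (fun j => PySem.List.pyGetD xs j "") from rfl,
    ← List.map_map, PySem.List.map_pyGetD_pyRange_zero]

-- with unique keys, filtering out the middle key keeps exactly prefix and tail
theorem pv_filter_middle (pre tail : List (String × List String)) (key : String) (val : List String)
    (hnd : ((pre ++ (key, val) :: tail).map Prod.fst).Nodup) :
    (pre ++ (key, val) :: tail).filter (fun kv2 => kv2.1 ≠ key) = pre ++ tail := by
  rw [List.map_append, List.map_cons] at hnd
  have hkey : key ∉ (pre.map Prod.fst) ∧ key ∉ (tail.map Prod.fst) := by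
    constructor
    · intro h
      exact (List.disjoint_of_nodup_append hnd) h (by simp)
    · intro h
      exact (List.nodup_cons.mp (List.nodup_append.mp hnd).2.1).1 h
  have h1 : pre.filter (fun kv2 => kv2.1 ≠ key) = pre :=
    List.filter_eq_self.mpr (fun a ha => by
      simp only [ne_eq, decide_eq_true_eq]
      exact fun he => hkey.1 (he ▸ List.mem_map_of_mem ha))
  have h2 : tail.filter (fun kv2 => kv2.1 ≠ key) = tail :=
    List.filter_eq_self.mpr (fun a ha => by
      simp only [ne_eq, decide_eq_true_eq]
      exact fun he => hkey.2 (he ▸ List.mem_map_of_mem ha))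
  rw [List.filter_append, List.filter_cons, if_neg (by simp), h1, h2]

-- the zipper recursion, related to A's filter form, for any split point of data
theorem pv_go_eq (data : List (String × List String))
    (hnd : (data.map Prod.fst).Nodup) :
    ∀ (rest pre : List (String × List String)), data = pre ++ rest →
      pvGo (pre.map (fun kv => (kv.1, pvFirst kv.2))) rest
        = rest.flatMap (fun kv => kv.2.map (fun x =>
            (PySem.Dict.ofList
              (((data.filter (fun kv2 => kv2.1 ≠ kv.1)).map (fun kv2 => (kv2.1, pvFirst kv2.2)))
                ++ [(kv.1, x)])).items)) := by
  intro rest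
  induction rest with
  | nil => intro pre _; simp [pvGo]
  | cons hd tail ih =>
    intro pre hdata
    obtain ⟨key, val⟩ := hd
    have hfil : data.filter (fun kv2 => kv2.1 ≠ key) = pre ++ tail := by
      rw [hdata] at hnd ⊢
      exact pv_filter_middle pre tail key val hnd
    have hrec := ih (pre ++ [(key, val)]) (by simpa using hdata)
    simp only [pvGo, List.flatMap_cons]
    rw [List.map_append] at hrec
    simp only [List.map_cons, List.map_nil] at hrec
    rw [hrec, hfil, List.map_append]

-- ===== VERDICT (by name: the statement is the Claim_ definition above) =====
theorem generate_test_data_from_dict_spec : Claim_equal_generate_test_data_from_dict := by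
  intro data _ hpre
  obtain ⟨hnd, _⟩ := hpre
  show generate_test_data_from_dict data = generate_test_data_from_dict_alt data
  unfold generate_test_data_from_dict generate_test_data_from_dict_alt
  simp only [PySem.List.foldl_append_singleton_eq_map, PySem.List.foldl_append_eq_flatMap,
    List.nil_append]
  have hgo := pv_go_eq data hnd data [] rfl
  simp only [List.map_nil] at hgo
  rw [hgo, List.flatMap_def, List.flatMap_def]
  refine congrArg List.flatten (List.map_congr_left ?_)
  intro kv hkv
  rw [pv_foldl_if_insert data kv.1, pv_map_range_get kv.2
    (fun x => ((PySem.Dict.ofList ((data.filter (fun kv2 => kv2.1 ≠ kv.1)).map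
      (fun kv2 => (kv2.1, pvFirst kv2.2)))).insert kv.1 x).items)]
  refine List.map_congr_left ?_
  intro x _
  rw [pv_ofList_append_singleton]
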